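/- GENERATED by tools/from_farm_form.py from prooffarm-gif/accepted/DGifDecompressLine.8/Proof.lean (a worked proof of the farm's unit `DGifDecompressLine.8`,
   accepted by the verdict) — do not edit. -/
import Gif.Spec.Units.DGifDecompressLine_8
import Gif.Spec.AllSegs
import Gif.Spec.Proved.DGifDecompressLine_8_Lemmas

open X86 X86.User Asan ProgX.Base ProgX.Base.Spec Gif.Spec

/-!
  `DGifDecompressLine.8` (0x106da7 … 0x106e05, 24 instructions; dgif_lib.c:934-938): the arm `CrntCode == RunningCode - 2` of the
  LZW decoder. The call of DGifGetPrefixChar sits in the middle; its return address 0x106db7 (`ret21`) is made a cut of the unit's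
  own, with the assertion `Mid` again (everything `Mid` speaks of is callee-saved or memory the callee does not touch). Two walks
  (Lemmas.lean), chained here.
-/

/-- Segment 8 of `DGifDecompressLine` takes `Mid` at 0x106da7 to `Trace` at the head of the trace loop 0x106e4b with `k = 4094`. -/
theorem Gif.Spec.Proved.DGifDecompressLine_8_ok : Gif.Spec.DGifDecompressLine_8.Statement := by
  intro Lay hLay μ hμ u₀ hcode h_DGifGetPrefixChar h_asan_store1_noabort H rest frames F R n m e ret v hat
  -- the callee's contract for the frame list of the body (the own frame in front) and the private object
  have hgpc := h_DGifGetPrefixChar H rest (DGifDecompressLine.framesIn frames e) F.pv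
  -- 0x106da7 … the call … 0x106db7 (ret21)
  refine (Gif.Spec.DGifDecompressLine_8.dl8_seg_call Lay hLay μ hμ u₀ hcode H rest frames F R n m e ret hgpc v hat).trans ?_
  -- 0x106db7 … 0x106e4b
  intro v1 hv1
  exact Gif.Spec.DGifDecompressLine_8.dl8_seg_tail Lay hLay μ hμ u₀ hcode H rest frames F R n m e ret h_asan_store1_noabort v1 hv1
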